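-- pv_equiv track=rewrite | github.com/HimanshuLadva/Python-DSA | Leetcode/daily/202601/20260115.py | maxSpan
-- ===== SOURCE A (Python) =====
-- from typing import List
--
-- def maxSpan(bars: List[int]):
--     res = 1
--     streak = 1
--     for i in range(1, len(bars)):
--         if bars[i] - bars[i-1] == 1:
--             streak += 1
--         else:
--             streak = 1
--         res = max(res, streak)
--
--     res += 1
--     return res
-- ===== SOURCE B (Python) =====
-- from typing import List
-- from itertools import groupby
--
-- def maxSpan(bars: List[int]):
--     flags = [b - a == 1 for a, b in zip(bars, bars[1:])]
--     best = max((sum(1 for _ in g) for k, g in groupby(flags) if k), default=0)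
--     return best + 2
-- ===== Notes on version B (the rewrite author's own statement) =====
-- stated objective: idiomatic
-- what changed: Replaces the stateful streak/res scan with a declarative pipeline: build the boolean list of +1 adjacent differences, group it with itertools.groupby, and take the longest True group (default 0) plus 2.
import Mathlib
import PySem

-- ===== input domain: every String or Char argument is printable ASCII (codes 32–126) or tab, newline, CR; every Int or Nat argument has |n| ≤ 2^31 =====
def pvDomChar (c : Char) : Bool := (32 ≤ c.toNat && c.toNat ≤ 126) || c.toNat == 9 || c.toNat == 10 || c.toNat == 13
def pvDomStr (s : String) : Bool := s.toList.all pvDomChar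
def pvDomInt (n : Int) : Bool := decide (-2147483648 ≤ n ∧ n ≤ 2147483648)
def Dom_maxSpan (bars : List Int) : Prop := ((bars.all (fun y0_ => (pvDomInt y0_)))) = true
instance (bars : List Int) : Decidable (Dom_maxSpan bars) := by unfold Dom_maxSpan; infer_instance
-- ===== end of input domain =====

-- B replaces A's stateful streak scan by a groupby pipeline (longest True group of the +1-difference flags, plus 2); same O(n) cost.

-- ===== PORT A =====
-- literal port of A's indexed loop: res/streak state over range(1, len(bars))
def maxSpan (bars : List Int) : Int :=
  let st := (PySem.List.pyRange 1 (bars.length : Int) 1).foldl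
    (fun (st : Int × Int) i =>
      let streak := if PySem.List.pyGetD bars i 0 - PySem.List.pyGetD bars (i - 1) 0 = 1 then st.2 + 1 else 1
      (max st.1 streak, streak)) (1, 1)
  st.1 + 1

-- ===== PORT B =====
-- run-length grouping of consecutive equal booleans, as itertools.groupby yields it:
-- the leading run of the head's value, then the groups of the remainder
def pvRle (fs : List Bool) : List (Bool × Int) :=
  match fs with
  | [] => []
  | f :: rest =>
    (f, 1 + ((rest.takeWhile (· == f)).length : Int)) :: pvRle (rest.dropWhile (· == f))
termination_by fs.length
decreasing_by simp; exact rest.length_dropWhile_le _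

def maxSpan_alt (bars : List Int) : Int :=
  let flags := (bars.zip (bars.drop 1)).map (fun p => decide (p.2 - p.1 = 1))
  let best := ((pvRle flags).filterMap (fun kg => if kg.1 then some kg.2 else none)).foldl max 0
  best + 2

-- ===== PRECONDITION & SPEC =====
def Spec_maxSpan (bars : List Int) (out : Int) : Prop := out = maxSpan_alt bars
instance (bars : List Int) (out : Int) : Decidable (Spec_maxSpan bars out) := by unfold Spec_maxSpan; infer_instance

-- ===== CLAIM (what is proved, stated in full; the proofs are below) =====
def Claim_equal_maxSpan : Prop := ∀ (bars : List Int), Dom_maxSpan bars → Spec_maxSpan bars (maxSpan bars)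

-- ===== LEMMAS AND PROOFS =====

-- leading run of `true`s
def pvP : List Bool → Int
  | [] => 0
  | f :: fs => if f then pvP fs + 1 else 0

-- longest run of `true`s
def pvM : List Bool → Int
  | [] => 0
  | f :: fs => if f then max (pvP fs + 1) (pvM fs) else pvM fs

def pvMaxL : List Int → Int
  | [] => 0
  | x :: l => max x (pvMaxL l)

-- the loop body of A, on a flag
def pvStep (st : Int × Int) (f : Bool) : Int × Int :=
  (max st.1 (if f then st.2 + 1 else 1), if f then st.2 + 1 else 1)

theorem pvP_nonneg (fs : List Bool) : 0 ≤ pvP fs := by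
  induction fs with
  | nil => simp [pvP]
  | cons f fs ih => cases f <;> simp [pvP]; omega

theorem pvM_nonneg (fs : List Bool) : 0 ≤ pvM fs := by
  induction fs with
  | nil => simp [pvM]
  | cons f fs ih => cases f <;> simp [pvM] <;> omega

theorem pvP_le_pvM (fs : List Bool) : pvP fs ≤ pvM fs := by
  induction fs with
  | nil => simp [pvP, pvM]
  | cons f fs ih =>
    cases f
    · simpa [pvP, pvM] using pvM_nonneg fs
    · simp [pvP, pvM]

theorem pvP_takeWhile (fs : List Bool) :
    pvP fs = ((fs.takeWhile (· == true)).length : Int) := by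
  induction fs with
  | nil => simp [pvP]
  | cons f fs ih =>
    cases f <;> simp [pvP, List.takeWhile, ih]

theorem pvM_dropWhile_true (fs : List Bool) :
    pvM fs = max (pvP fs) (pvM (fs.dropWhile (· == true))) := by
  induction fs with
  | nil => simp [pvP, pvM]
  | cons f fs ih =>
    cases f
    · have h : List.dropWhile (· == true) (false :: fs) = false :: fs := by
        simp
      rw [h]
      have := pvM_nonneg (false :: fs)
      simp [pvP]
      omega
    · have h : List.dropWhile (· == true) (true :: fs) = List.dropWhile (· == true) fs := by
        simp
      rw [h]
      have hpm := pvP_le_pvM fs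
      simp [pvP, pvM, ih]
      omega

theorem pvM_dropWhile_false (fs : List Bool) :
    pvM (fs.dropWhile (· == false)) = pvM fs := by
  induction fs with
  | nil => simp
  | cons f fs ih =>
    cases f
    · have h : List.dropWhile (· == false) (false :: fs) = List.dropWhile (· == false) fs := by
        simp
      rw [h, ih]
      simp [pvM]
    · have h : List.dropWhile (· == false) (true :: fs) = true :: fs := by
        simp
      rw [h]

theorem foldl_max_eq (l : List Int) : ∀ a : Int, 0 ≤ a → l.foldl max a = max a (pvMaxL l) := by
  induction l with
  | nil => intro a ha; simp [pvMaxL]; omega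
  | cons x l ih =>
    intro a ha
    simp only [List.foldl, pvMaxL]
    rw [ih (max a x) (le_max_of_le_left ha)]
    omega

theorem rle_maxL : (fs : List Bool) →
    pvMaxL ((pvRle fs).filterMap (fun kg => if kg.1 then some kg.2 else none)) = pvM fs
  | [] => by rw [pvRle.eq_def]; simp [pvM, pvMaxL]
  | false :: rest => by
    have hbf : (fun x : Bool => x == false) = (fun x : Bool => !x) := by
      funext x; cases x <;> rfl
    have ih := rle_maxL (rest.dropWhile (· == false))
    have h4 := pvM_dropWhile_false rest
    rw [hbf] at ih h4
    rw [pvRle.eq_def]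
    simp only [List.filterMap_cons]
    norm_num
    rw [ih, h4]
    simp [pvM]
  | true :: rest => by
    have hbt : (fun x : Bool => x == true) = (fun x : Bool => x) := by
      funext x; cases x <;> rfl
    have ih := rle_maxL (rest.dropWhile (· == true))
    have h1 := pvM_dropWhile_true (true :: rest)
    have h2 : List.dropWhile (· == true) (true :: rest) = List.dropWhile (· == true) rest := by
      simp
    rw [h2] at h1
    have h5 := pvP_takeWhile rest
    rw [hbt] at ih h1 h5
    rw [pvRle.eq_def]
    simp only [List.filterMap_cons]
    norm_num
    rw [pvMaxL, ih, h1]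
    have h3 : pvP (true :: rest) = pvP rest + 1 := by simp [pvP]
    rw [h3, h5]
    omega
termination_by fs => fs.length
decreasing_by all_goals (simp; exact List.length_dropWhile_le _ rest)

-- the A-side loop over the flag list, with its invariant
theorem loop_flags (fs : List Bool) :
    ∀ res s : Int, 1 ≤ s → s ≤ res →
    (fs.foldl pvStep (res, s)).1 = max res (max (s + pvP fs) (1 + pvM fs)) := by
  induction fs with
  | nil =>
    intro res s h1 h2
    simp [pvP, pvM]; omega
  | cons f fs ih =>
    intro res s h1 h2
    rw [List.foldl_cons]
    cases f
    · have h : pvStep (res, s) false = (max res 1, 1) := by simp [pvStep]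
      rw [h, ih (max res 1) 1 le_rfl (le_max_right _ _)]
      have := pvP_le_pvM fs
      have := pvP_nonneg fs
      simp [pvP, pvM]
      omega
    · have h : pvStep (res, s) true = (max res (s + 1), s + 1) := by simp [pvStep]
      rw [h, ih (max res (s + 1)) (s + 1) (by omega) (le_max_right _ _)]
      have := pvP_nonneg fs
      simp [pvP, pvM]
      omega

-- A's indexed pass computes exactly the flag list B builds
theorem flags_eq (bars : List Int) :
    (PySem.List.pyRange 1 (bars.length : Int) 1).map
      (fun i => decide (PySem.List.pyGetD bars i 0 - PySem.List.pyGetD bars (i - 1) 0 = 1))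
    = (bars.zip (bars.drop 1)).map (fun p => decide (p.2 - p.1 = 1)) := by
  apply List.ext_getElem
  · simp [PySem.List.length_pyRange_one]
  · intro k h1 h2
    have hlen : k + 1 < bars.length := by
      simp [PySem.List.length_pyRange_one] at h1
      omega
    simp only [List.getElem_map, PySem.List.getElem_pyRange_one, List.getElem_zip,
      List.getElem_drop]
    rw [PySem.List.pyGetD_eq_getElem bars 0 (by omega) (by omega),
        PySem.List.pyGetD_eq_getElem bars 0 (by omega) (by omega)]
    have hi : ((1 : Int) + k).toNat = 1 + k := by omega
    have hi2 : ((1 : Int) + k - 1).toNat = k := by omega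
    simp [hi, Nat.add_comm 1 k]

-- ===== VERDICT (by name: the statement is the Claim_ definition above) =====
theorem maxSpan_spec : Claim_equal_maxSpan := by
  intro bars _
  show maxSpan bars = maxSpan_alt bars
  show ((PySem.List.pyRange 1 (bars.length : Int) 1).foldl
      (fun (st : Int × Int) i =>
        let streak := if PySem.List.pyGetD bars i 0 - PySem.List.pyGetD bars (i - 1) 0 = 1 then st.2 + 1 else 1
        (max st.1 streak, streak)) (1, 1)).1 + 1 = maxSpan_alt bars
  set flags := (bars.zip (bars.drop 1)).map (fun p => decide (p.2 - p.1 = 1)) with hflags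
  have step : (PySem.List.pyRange 1 (bars.length : Int) 1).foldl
      (fun (st : Int × Int) i =>
        let streak := if PySem.List.pyGetD bars i 0 - PySem.List.pyGetD bars (i - 1) 0 = 1 then st.2 + 1 else 1
        (max st.1 streak, streak)) (1, 1)
      = flags.foldl pvStep (1, 1) := by
    rw [hflags, ← flags_eq bars, List.foldl_map]
    have hfn : (fun (st : Int × Int) i =>
        let streak := if PySem.List.pyGetD bars i 0 - PySem.List.pyGetD bars (i - 1) 0 = 1 then st.2 + 1 else 1
        (max st.1 streak, streak))
        = (fun (st : Int × Int) i => pvStep st (decide (PySem.List.pyGetD bars i 0 - PySem.List.pyGetD bars (i - 1) 0 = 1))) := by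
      funext st i
      simp [pvStep]
    rw [hfn]
  rw [step, loop_flags flags 1 1 le_rfl le_rfl]
  show _ = (((pvRle flags).filterMap (fun kg => if kg.1 then some kg.2 else none)).foldl max 0) + 2
  rw [foldl_max_eq _ 0 le_rfl, rle_maxL flags]
  have := pvP_le_pvM flags
  have := pvP_nonneg flags
  have := pvM_nonneg flags
  omega
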